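-- pv_equiv track=rewrite | github.com/MartinHerr/advent-of-code-2024 | day14/solve_star_two.py | right_branch_score
-- ===== SOURCE A (Python) =====
-- def right_branch_score(pos, set_of_robots_pos, visited, map_size):
--     (x, y) = pos
--     if pos not in set_of_robots_pos:
--         return 0
--     else:
--         visited[pos] = True
--         if y < map_size[1] - 1 and x < map_size[0] - 1:
--             return 1 + right_branch_score((x + 1, y + 1), set_of_robots_pos, visited, map_size)
--     return 1
-- ===== SOURCE B (Python) =====
-- def right_branch_score(pos, set_of_robots_pos, visited, map_size):
--     x, y = pos
--     count = 0
--     while True: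
--         if (x, y) not in set_of_robots_pos:
--             return count
--         visited[(x, y)] = True
--         count += 1
--         if not (y < map_size[1] - 1 and x < map_size[0] - 1):
--             return count
--         x += 1
--         y += 1
-- ===== Notes on version B (the rewrite author's own statement) =====
-- stated objective: simpler
-- what changed: Replaces the non-tail recursion (1 + recursive call down the diagonal) with an iterative while-loop carrying an explicit counter, performing the same visited marking.
import Mathlib
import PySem

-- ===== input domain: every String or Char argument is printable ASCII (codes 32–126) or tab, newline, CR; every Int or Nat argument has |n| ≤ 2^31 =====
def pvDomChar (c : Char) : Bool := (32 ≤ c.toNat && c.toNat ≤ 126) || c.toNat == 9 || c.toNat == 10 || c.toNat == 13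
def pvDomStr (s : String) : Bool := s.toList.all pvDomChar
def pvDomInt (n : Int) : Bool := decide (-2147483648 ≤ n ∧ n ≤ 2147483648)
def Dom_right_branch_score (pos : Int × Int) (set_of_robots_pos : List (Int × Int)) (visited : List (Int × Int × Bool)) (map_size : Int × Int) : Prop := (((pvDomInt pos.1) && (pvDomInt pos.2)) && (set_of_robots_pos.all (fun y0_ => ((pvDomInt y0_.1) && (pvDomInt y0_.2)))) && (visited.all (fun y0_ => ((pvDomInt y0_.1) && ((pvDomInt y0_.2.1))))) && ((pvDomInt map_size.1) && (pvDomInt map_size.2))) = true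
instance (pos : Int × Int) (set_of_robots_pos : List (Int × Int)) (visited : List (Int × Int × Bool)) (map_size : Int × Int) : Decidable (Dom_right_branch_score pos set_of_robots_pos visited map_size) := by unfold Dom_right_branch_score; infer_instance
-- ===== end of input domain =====

-- B replaces A's non-tail recursion along the diagonal by an iterative loop with an explicit
-- counter (objective: simpler). Both A and B mutate `visited` identically in Python; the
-- equivalence proved here is about the RETURN value only (`visited` does not affect it).

-- ===== PORT A =====
-- A's recursion: stop with 0 if pos is not a robot, otherwise 1 plus the score one step
-- down-right, provided both coordinates are strictly inside the map boundary.
def right_branch_score (pos : Int × Int) (set_of_robots_pos : List (Int × Int)) (visited : List (Int × Int × Bool)) (map_size : Int × Int) : Int :=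
  if pos ∉ set_of_robots_pos then 0
  else if pos.2 < map_size.2 - 1 ∧ pos.1 < map_size.1 - 1 then
    1 + right_branch_score (pos.1 + 1, pos.2 + 1) set_of_robots_pos visited map_size
  else 1
termination_by (map_size.1 - 1 - pos.1).toNat
decreasing_by simp at *; omega

-- ===== PORT B =====
-- B's while-loop: carry (x, y) and an explicit counter; return the counter at either exit.
def rbsLoop (set_of_robots_pos : List (Int × Int)) (map_size : Int × Int) (x y count : Int) : Int :=
  if (x, y) ∉ set_of_robots_pos then count
  else if ¬ (y < map_size.2 - 1 ∧ x < map_size.1 - 1) then count + 1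
  else rbsLoop set_of_robots_pos map_size (x + 1) (y + 1) (count + 1)
termination_by (map_size.1 - 1 - x).toNat
decreasing_by simp at *; omega

def right_branch_score_alt (pos : Int × Int) (set_of_robots_pos : List (Int × Int)) (visited : List (Int × Int × Bool)) (map_size : Int × Int) : Int :=
  rbsLoop set_of_robots_pos map_size pos.1 pos.2 0

-- ===== PRECONDITION & SPEC =====
def Spec_right_branch_score (pos : Int × Int) (set_of_robots_pos : List (Int × Int)) (visited : List (Int × Int × Bool)) (map_size : Int × Int) (out : Int) : Prop := out = right_branch_score_alt pos set_of_robots_pos visited map_size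
instance (pos : Int × Int) (set_of_robots_pos : List (Int × Int)) (visited : List (Int × Int × Bool)) (map_size : Int × Int) (out : Int) : Decidable (Spec_right_branch_score pos set_of_robots_pos visited map_size out) := by unfold Spec_right_branch_score; infer_instance

-- ===== CLAIM (what is proved, stated in full; the proofs are below) =====
def Claim_equal_right_branch_score : Prop := ∀ (pos : Int × Int) (set_of_robots_pos : List (Int × Int)) (visited : List (Int × Int × Bool)) (map_size : Int × Int), Dom_right_branch_score pos set_of_robots_pos visited map_size → Spec_right_branch_score pos set_of_robots_pos visited map_size (right_branch_score pos set_of_robots_pos visited map_size)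

-- ===== LEMMAS AND PROOFS =====

-- Loop invariant: B's accumulator loop equals the accumulator plus A's recursive score.
theorem rbsLoop_eq (s : List (Int × Int)) (v : List (Int × Int × Bool)) (ms : Int × Int) :
    ∀ (n : ℕ) (x y c : Int), (ms.1 - 1 - x).toNat = n →
      rbsLoop s ms x y c = c + right_branch_score (x, y) s v ms := by
  intro n
  induction n using Nat.strong_induction_on with
  | _ n ih =>
    intro x y c hn
    rw [rbsLoop, right_branch_score]
    by_cases hm : (x, y) ∈ s
    · by_cases hb : y < ms.2 - 1 ∧ x < ms.1 - 1
      · rw [ih ((ms.1 - 1 - (x + 1)).toNat) (by have := hb.2; omega) (x + 1) (y + 1) (c + 1) rfl]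
        simp only [hm, hb, not_true_eq_false, if_false, if_true, and_self]
        ring
      · simp [hm, hb]
    · simp [hm]

-- ===== VERDICT (by name: the statement is the Claim_ definition above) =====
theorem right_branch_score_spec : Claim_equal_right_branch_score := by
  intro pos s v ms _
  unfold Spec_right_branch_score right_branch_score_alt
  rw [rbsLoop_eq s v ms (ms.1 - 1 - pos.1).toNat pos.1 pos.2 0 rfl]
  simp
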